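-- pv_equiv track=rewrite | github.com/Nadock/advent_of_code | aoc_2024/day_19/day_19.py | find_towel_pattern
-- ===== SOURCE A (Python) =====
-- def find_towel_pattern(towels: list[str], target: str) -> list[str] | None:
--     """Find a valid towel pattern."""
--     options: list[list[str]] = [[]]
--
--     while options:
--         option = options.pop(0)
--         current = "".join(option)
--         if current == target:
--             return option
--
--         remaining = target.removeprefix(current)
--         for towel in towels:
--             if remaining.startswith(towel):
--                 options.append([*option, towel])  # noqa: PERF401
--
--         options.sort(key=lambda o: len(o), reverse=True)
--
--     return None
-- ===== SOURCE B (Python) =====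
-- def find_towel_pattern(towels: list[str], target: str) -> list[str] | None:
--     """Find a valid towel pattern (bottom-up DP over suffixes of target)."""
--     n = len(target)
--     dp: list[list[str] | None] = [None] * (n + 1)
--     dp[n] = []
--     for i in range(n - 1, -1, -1):
--         for towel in towels:
--             if target.startswith(towel, i):
--                 rest = dp[i + len(towel)]
--                 if rest is not None:
--                     dp[i] = [towel] + rest
--                     break
--     return dp[0]
-- ===== Notes on version B (the rewrite author's own statement) =====
-- stated objective: faster
-- what changed: Replaced A's best-first frontier search (list popped from the front, children appended, full stable re-sort by option length every iteration) with a bottom-up dynamic program over suffix positions of target: dp[i] holds the first decomposition of target[i:] (towels tried in list order), filled from i=n down to 0, so the exponential search tree and the per-iteration sort disappear.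
-- outside the precondition, e.g. on find_towel_pattern(['a', ''], 'a'): A returns ['a'], B returns ['a']
import Mathlib
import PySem

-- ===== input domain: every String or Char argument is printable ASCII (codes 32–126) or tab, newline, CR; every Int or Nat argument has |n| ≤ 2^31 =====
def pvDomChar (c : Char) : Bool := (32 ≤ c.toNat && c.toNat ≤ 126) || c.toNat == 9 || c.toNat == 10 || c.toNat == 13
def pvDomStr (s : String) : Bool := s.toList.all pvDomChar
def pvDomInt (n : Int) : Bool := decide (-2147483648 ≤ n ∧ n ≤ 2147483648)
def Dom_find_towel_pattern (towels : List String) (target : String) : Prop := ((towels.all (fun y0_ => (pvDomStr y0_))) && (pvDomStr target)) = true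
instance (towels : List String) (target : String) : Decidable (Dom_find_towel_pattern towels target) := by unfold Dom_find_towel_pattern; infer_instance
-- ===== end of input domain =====

-- B replaces A's best-first frontier search (pop front, append children, full stable
-- re-sort by option length each iteration) with a bottom-up dynamic program over the
-- suffix positions of target (objective: faster — no search tree, no repeated sort).

-- ===== PORT A =====
-- target.removeprefix(current): exact hand port (PySem has no removeprefix) —
-- drops the prefix if target starts with it, else returns target unchanged.
def pvRemoveprefix (s p : String) : String :=
  if PySem.Str.startswith s p then String.ofList (s.toList.drop p.toList.length) else s

-- fuel for the while-loop: an upper bound on the number of iterations (proved in the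
-- lemmas below); the guard only makes the loop total, it never fires under Pre_.
def pvFuelA (towels : List String) (target : String) : Nat :=
  (towels.length + 1) ^ (target.toList.length + 1)

def pvLoopA (towels : List String) (target : String) : Nat → List (List String) → Option (List String)
  | 0, _ => none                  -- fuel exhausted (unreachable under Pre_)
  | _ + 1, [] => none             -- while options: … falls through; return None
  | fuel + 1, option :: options =>  -- option = options.pop(0)
    let current := PySem.Str.join "" option
    if current = target then some option
    else
      let remaining := pvRemoveprefix target current
      -- for towel in towels: if remaining.startswith(towel): options.append([*option, towel])
      let options := towels.foldl
        (fun acc towel => if PySem.Str.startswith remaining towel then acc ++ [option ++ [towel]] else acc)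
        options
      -- options.sort(key=lambda o: len(o), reverse=True)
      pvLoopA towels target fuel (PySem.List.sorted options (fun o => o.length) true)

def find_towel_pattern (towels : List String) (target : String) : Option (List String) :=
  pvLoopA towels target (pvFuelA towels target) [[]]

-- ===== PORT B =====
-- target.startswith(towel, i) for 0 ≤ i: exact hand port (PySem.Str.startswith has no
-- start offset) — Python compares towel against target at offset i.
def pvStartswithFrom (target towel : String) (i : Nat) : Bool :=
  PySem.Chars.startswith (target.toList.drop i) towel.toList

-- inner 'for towel in towels: … break': first towel that matches at i with a solved rest
def pvInnerB (towels : List String) (target : String) (dp : List (Option (List String))) (i : Nat) :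
    Option (List String) :=
  match towels with
  | [] => none
  | towel :: rest =>
    if pvStartswithFrom target towel i then
      match dp.getD (i + towel.toList.length) none with
      | some r => some (towel :: r)        -- dp[i] = [towel] + rest; break
      | none => pvInnerB rest target dp i
    else pvInnerB rest target dp i

def find_towel_pattern_alt (towels : List String) (target : String) : Option (List String) :=
  let n := target.toList.length
  let dp : List (Option (List String)) := (List.replicate (n + 1) none).set n (some [])
  -- for i in range(n - 1, -1, -1): counts n-1, n-2, …, 0 — exactly (List.range n).reverse
  let dp := ((List.range n).reverse).foldl
    (fun dp i => match pvInnerB towels target dp i with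
      | some v => dp.set i (some v)
      | none => dp)
    dp
  dp.getD 0 none                  -- return dp[0]

-- ===== PRECONDITION & SPEC =====
-- Pre_ excludes towel lists containing the empty string: there A's frontier can be
-- extended with "" forever, so A loops without terminating on most such inputs and
-- returns only when the search happens to hit target first.
def Pre_find_towel_pattern (towels : List String) (target : String) : Prop :=
  "" ∉ towels
instance (towels : List String) (target : String) : Decidable (Pre_find_towel_pattern towels target) := by
  unfold Pre_find_towel_pattern; infer_instance

def pvWitness_find_towel_pattern : List String × String := (["ab", "a", "b"], "aab")

def Spec_find_towel_pattern (towels : List String) (target : String) (out : Option (List String)) : Prop := out = find_towel_pattern_alt towels target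
instance (towels : List String) (target : String) (out : Option (List String)) : Decidable (Spec_find_towel_pattern towels target out) := by unfold Spec_find_towel_pattern; infer_instance

-- ===== CLAIM (what is proved, stated in full; the proofs are below) =====
def Claim_equal_find_towel_pattern : Prop := ∀ (towels : List String) (target : String), Dom_find_towel_pattern towels target → Pre_find_towel_pattern towels target → Spec_find_towel_pattern towels target (find_towel_pattern towels target)

-- ===== LEMMAS AND PROOFS =====

-- The common functional spec: pvSol towels rem = the first decomposition of rem into
-- towels, towels tried in list order at every position (DFS order = A's pop order = B's dp).
mutual
def pvSol (towels : List String) (rem : List Char) : Option (List String) :=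
  if rem = [] then some [] else pvSolGo towels towels rem
termination_by (rem.length, towels.length + 1)
def pvSolGo (towels : List String) (ts : List String) (rem : List Char) : Option (List String) :=
  match ts with
  | [] => none
  | t :: ts' =>
    if h : t.toList ≠ [] ∧ t.toList <+: rem then
      match pvSol towels (rem.drop t.toList.length) with
      | some r => some (t :: r)
      | none => pvSolGo towels ts' rem
    else pvSolGo towels ts' rem
termination_by (rem.length, ts.length)
decreasing_by
  all_goals simp only [Prod.lex_def, List.length_drop]
  all_goals first
    | (left
       have h1 : 0 < t.toList.length := List.length_pos_of_ne_nil h.1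
       have h2 := h.2.length_le
       omega)
    | (right; exact ⟨trivial, by simp⟩)
end

-- number of frontier pops A spends on the subtree rooted at suffix rem
mutual
def pvCnt (towels : List String) (rem : List Char) : Nat :=
  if rem = [] then 1 else 1 + pvCntGo towels towels rem
termination_by (rem.length, towels.length + 1)
def pvCntGo (towels : List String) (ts : List String) (rem : List Char) : Nat :=
  match ts with
  | [] => 0
  | t :: ts' =>
    (if h : t.toList ≠ [] ∧ t.toList <+: rem then pvCnt towels (rem.drop t.toList.length) else 0)
      + pvCntGo towels ts' rem
termination_by (rem.length, ts.length)
decreasing_by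
  all_goals simp only [Prod.lex_def, List.length_drop]
  all_goals first
    | (left
       have h1 : 0 < t.toList.length := List.length_pos_of_ne_nil h.1
       have h2 := h.2.length_le
       omega)
    | (right; exact ⟨trivial, by simp⟩)
end

-- first non-None of a list of options (the value A's frontier search returns)
def pvFirst {α : Type} : List (Option α) → Option α
  | [] => none
  | x :: xs => match x with | some r => some r | none => pvFirst xs

-- the joined characters of an option
def pvJ (o : List String) : List Char := (o.map String.toList).flatten

theorem pvFirst_append {α : Type} (xs ys : List (Option α)) :
    pvFirst (xs ++ ys) = match pvFirst xs with | some r => some r | none => pvFirst ys := by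
  induction xs with
  | nil => simp [pvFirst]
  | cons x xs ih => cases x <;> simp [pvFirst, ih]

theorem pvIntersperse_nil_flatten (l : List (List Char)) :
    (List.intersperse ([] : List Char) l).flatten = l.flatten := by
  induction l with
  | nil => simp
  | cons x xs ih => cases xs <;> simp_all

theorem pvJ_toList (o : List String) : (PySem.Str.join "" o).toList = pvJ o := by
  show (String.ofList (PySem.Chars.join "".toList (o.map String.toList))).toList = pvJ o
  rw [String.toList_ofList]
  show PySem.Chars.join [] (o.map String.toList) = pvJ o
  unfold PySem.Chars.join List.intercalate pvJ
  exact pvIntersperse_nil_flatten _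

theorem pvJ_append (o : List String) (t : String) : pvJ (o ++ [t]) = pvJ o ++ t.toList := by
  simp [pvJ]

theorem pvInsertBy_mid {α : Type} (before : α → α → Bool) (x : α) (ys zs : List α)
    (h1 : ∀ y ∈ ys, before x y = false) (h2 : ∀ z ∈ zs, before x z = true) :
    PySem.List.insertBy before x (ys ++ zs) = ys ++ x :: zs := by
  induction ys with
  | nil =>
    cases zs with
    | nil => rfl
    | cons z zs => simp [PySem.List.insertBy, h2 z (by simp)]
  | cons y ys ih =>
    simp only [List.cons_append, PySem.List.insertBy, h1 y (by simp)]
    simp only [Bool.false_eq_true, if_false, List.cons.injEq, true_and]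
    exact ih (fun a ha => h1 a (by simp [ha]))

theorem pvSortStep (rest children : List (List String)) (L : Nat)
    (hr : rest.Pairwise (fun a b => b.length ≤ a.length))
    (hrL : ∀ r ∈ rest, r.length < L)
    (hc : ∀ c ∈ children, c.length = L) :
    PySem.List.sorted (rest ++ children) (fun o => o.length) true = children ++ rest := by
  rw [PySem.List.sorted_rev_eq_foldl_insertBy, List.foldl_append]
  have h1 : List.foldl
      (fun acc x => PySem.List.insertBy (fun a b => decide ((fun o : List String => o.length) b < (fun o : List String => o.length) a)) x acc)
      [] rest = rest := by
    rw [← PySem.List.sorted_rev_eq_foldl_insertBy]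
    exact PySem.List.sorted_rev_eq_self_of_pairwise rest _ hr
  rw [h1]
  suffices h : ∀ (cs done : List (List String)), (∀ c ∈ cs, c.length = L) → (∀ d ∈ done, d.length = L) →
      List.foldl
        (fun acc x => PySem.List.insertBy (fun a b => decide ((fun o : List String => o.length) b < (fun o : List String => o.length) a)) x acc)
        (done ++ rest) cs = done ++ cs ++ rest by
    simpa using h children [] hc (by simp)
  intro cs
  induction cs with
  | nil => intro done _ _; simp
  | cons c cs ih =>
    intro done hcs hdone
    have hcL : c.length = L := hcs c List.mem_cons_self
    simp only [List.foldl_cons]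
    rw [pvInsertBy_mid _ c done rest
      (fun d hd => by simp [hdone d hd, hcL])
      (fun r hr' => by simp [hcL]; exact hrL r hr')]
    have h2 := ih (done ++ [c]) (fun a ha => hcs a (List.mem_cons_of_mem _ ha))
      (fun dd hdd => by
        rcases List.mem_append.mp hdd with hh | hh
        · exact hdone dd hh
        · simp at hh; subst hh; exact hcL)
    simpa [List.append_assoc] using h2

-- cost bound: the subtree has at most (k+1)^(|rem|+1) nodes
theorem pvCntGo_le (towels : List String) (ts : List String) (rem : List Char) (hrem : rem ≠ [])
    (hb : ∀ rem' : List Char, rem'.length < rem.length → pvCnt towels rem' ≤ (towels.length + 1) ^ (rem'.length + 1)) :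
    pvCntGo towels ts rem ≤ ts.length * (towels.length + 1) ^ rem.length := by
  induction ts with
  | nil => simp [pvCntGo]
  | cons t ts' ih =>
    rw [pvCntGo]
    by_cases h : t.toList ≠ [] ∧ t.toList <+: rem
    · have hlen : (rem.drop t.toList.length).length < rem.length := by
        have h1 : 0 < t.toList.length := List.length_pos_of_ne_nil h.1
        have h2 := h.2.length_le
        simp only [List.length_drop]; omega
      have hbound := hb _ hlen
      have hmono : (towels.length + 1) ^ ((rem.drop t.toList.length).length + 1) ≤ (towels.length + 1) ^ rem.length := by
        apply Nat.pow_le_pow_right (by omega)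
        have h1 : 0 < t.toList.length := List.length_pos_of_ne_nil h.1
        simp only [List.length_drop]; omega
      simp only [dif_pos h]
      calc pvCnt towels (rem.drop t.toList.length) + pvCntGo towels ts' rem
          ≤ (towels.length + 1) ^ rem.length + ts'.length * (towels.length + 1) ^ rem.length :=
            Nat.add_le_add (le_trans hbound hmono) ih
        _ = (t :: ts').length * (towels.length + 1) ^ rem.length := by simp only [List.length_cons, Nat.succ_mul]; omega
    · simp only [dif_neg h, Nat.zero_add]
      calc pvCntGo towels ts' rem ≤ ts'.length * (towels.length + 1) ^ rem.length := ih
        _ ≤ (t :: ts').length * (towels.length + 1) ^ rem.length := by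
            apply Nat.mul_le_mul_right; simp

theorem pvCnt_le (towels : List String) (rem : List Char) :
    pvCnt towels rem ≤ (towels.length + 1) ^ (rem.length + 1) := by
  induction hn : rem.length using Nat.strong_induction_on generalizing rem with
  | _ n ih =>
  subst hn
  by_cases hrem : rem = []
  · subst hrem; rw [pvCnt]; simp
  · rw [pvCnt, if_neg hrem]
    have hk : ∀ rem' : List Char, rem'.length < rem.length → pvCnt towels rem' ≤ (towels.length + 1) ^ (rem'.length + 1) :=
      fun rem' h => ih rem'.length h rem' rfl
    have := pvCntGo_le towels towels rem hrem hk
    have hle : towels.length ≤ towels.length + 1 := by omega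
    calc 1 + pvCntGo towels towels rem
        ≤ 1 + towels.length * (towels.length + 1) ^ rem.length := by omega
      _ ≤ (towels.length + 1) ^ (rem.length + 1) := by
          rw [pow_succ]
          have h1 : 1 ≤ (towels.length + 1) ^ rem.length := Nat.one_le_pow _ _ (by omega)
          nlinarith

-- the per-pop expansion: children sums / firsts match pvCntGo / pvSolGo
theorem pvChildren_cnt (towels : List String) (ts : List String) (rem : List Char)
    (hne : ∀ t ∈ ts, t ≠ "") :
    ((ts.filter (fun t => PySem.Chars.startswith rem t.toList)).map
        (fun t => pvCnt towels (rem.drop t.toList.length))).sum = pvCntGo towels ts rem := by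
  induction ts with
  | nil => simp [pvCntGo]
  | cons t ts' ih =>
    have hne' : ∀ x ∈ ts', x ≠ "" := fun x hx => hne x (List.mem_cons_of_mem _ hx)
    have htne : t.toList ≠ [] := fun hh => hne t List.mem_cons_self (String.toList_eq_nil_iff.mp hh)
    rw [pvCntGo]
    by_cases hp : t.toList <+: rem
    · have hs : PySem.Chars.startswith rem t.toList = true := (PySem.Chars.startswith_iff _ _).mpr hp
      have hfc : List.filter (fun x => PySem.Chars.startswith rem x.toList) (t :: ts')
          = t :: List.filter (fun x => PySem.Chars.startswith rem x.toList) ts' := by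
        simp [hs]
      rw [hfc, List.map_cons, List.sum_cons, dif_pos ⟨htne, hp⟩, ih hne']
    · have hs : PySem.Chars.startswith rem t.toList = false := by
        rw [← Bool.not_eq_true]; intro hh; exact hp ((PySem.Chars.startswith_iff _ _).mp hh)
      have hfc : List.filter (fun x => PySem.Chars.startswith rem x.toList) (t :: ts')
          = List.filter (fun x => PySem.Chars.startswith rem x.toList) ts' := by
        simp [hs]
      rw [hfc, dif_neg (fun hh => hp hh.2), ih hne', Nat.zero_add]

theorem pvChildren_first (towels : List String) (ts : List String) (rem : List Char) (o : List String)
    (hne : ∀ t ∈ ts, t ≠ "") :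
    pvFirst ((ts.filter (fun t => PySem.Chars.startswith rem t.toList)).map
        (fun t => (pvSol towels (rem.drop t.toList.length)).map (fun r => (o ++ [t]) ++ r)))
      = (pvSolGo towels ts rem).map (fun r => o ++ r) := by
  induction ts with
  | nil => simp [pvSolGo, pvFirst]
  | cons t ts' ih =>
    have hne' : ∀ x ∈ ts', x ≠ "" := fun x hx => hne x (List.mem_cons_of_mem _ hx)
    have htne : t.toList ≠ [] := fun hh => hne t List.mem_cons_self (String.toList_eq_nil_iff.mp hh)
    rw [pvSolGo]
    by_cases hp : t.toList <+: rem
    · have hs : PySem.Chars.startswith rem t.toList = true := (PySem.Chars.startswith_iff _ _).mpr hp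
      have hfc : List.filter (fun x => PySem.Chars.startswith rem x.toList) (t :: ts')
          = t :: List.filter (fun x => PySem.Chars.startswith rem x.toList) ts' := by
        simp [hs]
      rw [hfc, List.map_cons, dif_pos ⟨htne, hp⟩]
      cases hsol : pvSol towels (rem.drop t.toList.length) with
      | some r => simp [pvFirst]
      | none => simp only [Option.map_none, pvFirst]; exact ih hne'
    · have hs : PySem.Chars.startswith rem t.toList = false := by
        rw [← Bool.not_eq_true]; intro hh; exact hp ((PySem.Chars.startswith_iff _ _).mp hh)
      have hfc : List.filter (fun x => PySem.Chars.startswith rem x.toList) (t :: ts')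
          = List.filter (fun x => PySem.Chars.startswith rem x.toList) ts' := by
        simp [hs]
      rw [hfc, dif_neg (fun hh => hp hh.2)]
      exact ih hne'

-- the frontier cost
def pvCost (towels : List String) (target : String) (F : List (List String)) : Nat :=
  (F.map (fun o => pvCnt towels (target.toList.drop (pvJ o).length))).sum

theorem pvLoopA_cons (towels : List String) (target : String) (f : Nat) (o : List String)
    (rest : List (List String)) :
    pvLoopA towels target (f + 1) (o :: rest) =
      if PySem.Str.join "" o = target then some o
      else pvLoopA towels target f (PySem.List.sorted
        (towels.foldl (fun acc towel =>
          if PySem.Str.startswith (pvRemoveprefix target (PySem.Str.join "" o)) towel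
          then acc ++ [o ++ [towel]] else acc) rest)
        (fun o => o.length) true) := rfl

-- MAIN LOOP LEMMA: under the frontier invariants, A's loop returns the first
-- pvSol-result of the frontier
theorem pvML (towels : List String) (target : String)
    (hne : ∀ t ∈ towels, t ≠ "") :
    ∀ (fuel : Nat) (F : List (List String)),
    F.Pairwise (fun a b => b.length ≤ a.length) →
    (∀ o ∈ F, pvJ o <+: target.toList) →
    pvCost towels target F ≤ fuel →
    pvLoopA towels target fuel F =
      pvFirst (F.map (fun o => (pvSol towels (target.toList.drop (pvJ o).length)).map (fun r => o ++ r))) := by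
  intro fuel
  induction fuel using Nat.strong_induction_on with
  | _ fuel ihf =>
  intro F hpair hpre hfuel
  cases F with
  | nil => cases fuel <;> rfl
  | cons o rest =>
    have hJ : pvJ o <+: target.toList := hpre o List.mem_cons_self
    obtain ⟨tl, htl⟩ := hJ
    have hdrop : target.toList.drop (pvJ o).length = tl := by rw [← htl, List.drop_left]
    have hcnt1 : 1 ≤ pvCnt towels tl := by rw [pvCnt]; split <;> omega
    have hcost : pvCost towels target (o :: rest) = pvCnt towels tl + pvCost towels target rest := by
      simp [pvCost, hdrop]
    obtain ⟨f, rfl⟩ : ∃ f, fuel = f + 1 := ⟨fuel - 1, by omega⟩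
    rw [pvLoopA_cons]
    by_cases htl0 : tl = []
    · subst htl0
      have hcur : PySem.Str.join "" o = target := by
        apply String.toList_inj.mp
        rw [pvJ_toList]
        simpa using htl
      rw [if_pos hcur, List.map_cons, hdrop, pvSol]
      simp [pvFirst]
    · have hcur : PySem.Str.join "" o ≠ target := by
        intro hh
        have h2 := congrArg String.toList hh
        rw [pvJ_toList] at h2
        rw [← htl] at h2
        exact htl0 (List.append_right_eq_self.mp h2.symm)
      rw [if_neg hcur]
      have hsw : PySem.Str.startswith target (PySem.Str.join "" o) = true := by
        rw [PySem.Str.startswith_eq, pvJ_toList]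
        exact (PySem.Chars.startswith_iff _ _).mpr ⟨tl, htl⟩
      have hrem : pvRemoveprefix target (PySem.Str.join "" o) = String.ofList tl := by
        unfold pvRemoveprefix
        rw [if_pos hsw, pvJ_toList, hdrop]
      rw [hrem]
      rw [PySem.List.foldl_append_if (fun towel => PySem.Str.startswith (String.ofList tl) towel)
        (fun towel => o ++ [towel]) towels rest]
      have hpred : (fun t : String => PySem.Str.startswith (String.ofList tl) t)
          = (fun t : String => PySem.Chars.startswith tl t.toList) := by
        funext t; rw [PySem.Str.startswith_eq, String.toList_ofList]
      rw [hpred]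
      set children := (towels.filter (fun t => PySem.Chars.startswith tl t.toList)).map
        (fun t => o ++ [t]) with hchildren
      have hpc := List.pairwise_cons.mp hpair
      have hsort : PySem.List.sorted (rest ++ children) (fun o => o.length) true = children ++ rest := by
        apply pvSortStep rest children (o.length + 1) hpc.2
        · intro r hr
          have := hpc.1 r hr
          omega
        · intro c hc
          obtain ⟨t, _, rfl⟩ := List.mem_map.mp hc
          simp
      rw [hsort]
      -- facts about members of children
      have hmemc : ∀ c ∈ children, ∃ t, t ∈ towels ∧ t.toList <+: tl ∧ c = o ++ [t] := by
        intro c hc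
        obtain ⟨t, ht, rfl⟩ := List.mem_map.mp hc
        obtain ⟨ht1, ht2⟩ := List.mem_filter.mp ht
        exact ⟨t, ht1, (PySem.Chars.startswith_iff _ _).mp ht2, rfl⟩
      -- invariants for the recursive call
      have hpair' : (children ++ rest).Pairwise (fun a b => b.length ≤ a.length) := by
        rw [List.pairwise_append]
        refine ⟨?_, hpc.2, ?_⟩
        · apply List.pairwise_of_forall_mem_list
          intro a ha b hb
          obtain ⟨_, _, _, rfl⟩ := hmemc a ha
          obtain ⟨_, _, _, rfl⟩ := hmemc b hb
          simp
        · intro a ha b hb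
          obtain ⟨_, _, _, rfl⟩ := hmemc a ha
          have := hpc.1 b hb
          simp; omega
      have hpre' : ∀ c ∈ children ++ rest, pvJ c <+: target.toList := by
        intro c hc
        rcases List.mem_append.mp hc with hc | hc
        · obtain ⟨t, _, hpt, rfl⟩ := hmemc c hc
          obtain ⟨u, hu⟩ := hpt
          refine ⟨u, ?_⟩
          rw [pvJ_append, List.append_assoc, hu, htl]
        · exact hpre c (List.mem_cons_of_mem _ hc)
      -- the per-child suffix
      have hcsuf : ∀ t : String, target.toList.drop (pvJ (o ++ [t])).length = tl.drop t.toList.length := by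
        intro t
        rw [pvJ_append, List.length_append, ← List.drop_drop, hdrop]
      -- cost of the new frontier
      have hcgo : pvCntGo towels towels tl =
          ((towels.filter (fun t => PySem.Chars.startswith tl t.toList)).map
            (fun t => pvCnt towels (tl.drop t.toList.length))).sum :=
        (pvChildren_cnt towels towels tl hne).symm
      have hcostc : pvCost towels target children = pvCntGo towels towels tl := by
        rw [hcgo]
        unfold pvCost
        rw [hchildren, List.map_map]
        congr 1
        apply List.map_congr_left
        intro t ht
        simp only [Function.comp]
        rw [hcsuf t]
      have hcnteq : pvCnt towels tl = 1 + pvCntGo towels towels tl := by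
        rw [pvCnt, if_neg htl0]
      have hcost' : pvCost towels target (children ++ rest) ≤ f := by
        have happ : pvCost towels target (children ++ rest)
            = pvCost towels target children + pvCost towels target rest := by
          simp [pvCost]
        rw [happ, hcostc]
        rw [hcost] at hfuel
        omega
      rw [ihf f (by omega) (children ++ rest) hpair' hpre' hcost']
      -- reduce both sides to a match on pvSolGo
      rw [List.map_append, pvFirst_append]
      have hfc : pvFirst (children.map
          (fun c => (pvSol towels (target.toList.drop (pvJ c).length)).map (fun r => c ++ r)))
          = (pvSolGo towels towels tl).map (fun r => o ++ r) := by
        rw [hchildren, List.map_map]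
        have hmc : ((towels.filter (fun t => PySem.Chars.startswith tl t.toList)).map
            ((fun c => (pvSol towels (target.toList.drop (pvJ c).length)).map (fun r => c ++ r)) ∘ (fun t => o ++ [t])))
            = ((towels.filter (fun t => PySem.Chars.startswith tl t.toList)).map
              (fun t => (pvSol towels (tl.drop t.toList.length)).map (fun r => (o ++ [t]) ++ r))) := by
          apply List.map_congr_left
          intro t ht
          simp only [Function.comp]
          rw [hcsuf t]
        rw [hmc]
        exact pvChildren_first towels towels tl o hne
      rw [hfc, List.map_cons, hdrop]
      have hsol : pvSol towels tl = pvSolGo towels towels tl := by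
        rw [pvSol, if_neg htl0]
      rw [hsol]
      cases pvSolGo towels towels tl with
      | some r => rfl
      | none => rfl

-- the dp step function of port B
def pvStepB (towels : List String) (target : String) (dp : List (Option (List String))) (i : Nat) :
    List (Option (List String)) :=
  match pvInnerB towels target dp i with
  | some v => dp.set i (some v)
  | none => dp

theorem pvAlt_def (towels : List String) (target : String) :
    find_towel_pattern_alt towels target =
      (((List.range target.toList.length).reverse).foldl (pvStepB towels target)
        ((List.replicate (target.toList.length + 1) none).set target.toList.length (some []))).getD 0 none := rfl

theorem pvInnerB_eq (towels : List String) (target : String) (dp : List (Option (List String))) (j : Nat)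
    (hj : j < target.toList.length)
    (hdp : ∀ m : Nat, dp.getD m none =
      if j + 1 ≤ m ∧ m ≤ target.toList.length then pvSol towels (target.toList.drop m) else none) :
    ∀ ts : List String, (∀ t ∈ ts, t ≠ "") →
    pvInnerB ts target dp j = pvSolGo towels ts (target.toList.drop j) := by
  intro ts hne
  induction ts with
  | nil => rw [pvInnerB, pvSolGo]
  | cons t ts' ih =>
    have hne' : ∀ x ∈ ts', x ≠ "" := fun x hx => hne x (List.mem_cons_of_mem _ hx)
    have htne : t.toList ≠ [] := fun hh => hne t List.mem_cons_self (String.toList_eq_nil_iff.mp hh)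
    rw [pvInnerB, pvSolGo]
    by_cases hp : t.toList <+: target.toList.drop j
    · have hs : pvStartswithFrom target t j = true := by
        unfold pvStartswithFrom; exact (PySem.Chars.startswith_iff _ _).mpr hp
      have h1 : 0 < t.toList.length := List.length_pos_of_ne_nil htne
      have h2 : t.toList.length ≤ target.toList.length - j := by
        have := hp.length_le; simpa [List.length_drop] using this
      have hgd : dp.getD (j + t.toList.length) none = pvSol towels (target.toList.drop (j + t.toList.length)) := by
        rw [hdp]; rw [if_pos (by omega)]
      have hdd : target.toList.drop (j + t.toList.length) = (target.toList.drop j).drop t.toList.length := by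
        rw [List.drop_drop]
      rw [if_pos hs, hgd, hdd, dif_pos ⟨htne, hp⟩]
      cases pvSol towels ((target.toList.drop j).drop t.toList.length) with
      | some r => rfl
      | none => exact ih hne'
    · have hs : pvStartswithFrom target t j = false := by
        unfold pvStartswithFrom
        rw [← Bool.not_eq_true]; intro hh; exact hp ((PySem.Chars.startswith_iff _ _).mp hh)
      rw [if_neg (by simp [hs]), dif_neg (fun hh => hp hh.2)]
      exact ih hne'

theorem pvDpInv (towels : List String) (target : String) (hne : ∀ t ∈ towels, t ≠ "") :
    ∀ (k j : Nat), j ≤ target.toList.length → target.toList.length - j = k →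
    (let dpk := (((List.range' j (target.toList.length - j)).reverse).foldl (pvStepB towels target)
        ((List.replicate (target.toList.length + 1) none).set target.toList.length (some [])))
     dpk.length = target.toList.length + 1 ∧
     ∀ m : Nat, dpk.getD m none =
       if j ≤ m ∧ m ≤ target.toList.length then pvSol towels (target.toList.drop m) else none) := by
  intro k
  induction k with
  | zero =>
    intro j hj hk
    have hjn : j = target.toList.length := by omega
    subst hjn
    simp only [Nat.sub_self, List.range'_zero, List.reverse_nil, List.foldl_nil]
    constructor
    · simp
    · intro m
      by_cases hm : m = target.toList.length
      · subst hm
        rw [List.getD, List.getElem?_set_self (by simp), if_pos (by omega)]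
        rw [List.drop_length, pvSol]
        simp
      · rw [List.getD, List.getElem?_set_ne (fun hh => hm hh.symm)]
        rw [if_neg (by omega)]
        cases hlt : (List.replicate (target.toList.length + 1) (none : Option (List String)))[m]? with
        | none => rfl
        | some v =>
          have := List.getElem?_eq_some_iff.mp hlt
          obtain ⟨hlen, hv⟩ := this
          simp at hv; simp [hv]
  | succ k ihk =>
    intro j hj hk
    have hjn : j < target.toList.length := by omega
    have hrange : List.range' j (target.toList.length - j) = j :: List.range' (j + 1) k := by
      rw [show target.toList.length - j = k + 1 from hk, List.range'_succ]
    simp only [hrange, List.reverse_cons, List.foldl_append, List.foldl_cons, List.foldl_nil]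
    have hprev := ihk (j + 1) (by omega) (by omega)
    simp only [show target.toList.length - (j + 1) = k by omega] at hprev
    obtain ⟨hlen, hdp⟩ := hprev
    set dpPrev := (((List.range' (j + 1) k).reverse).foldl (pvStepB towels target)
        ((List.replicate (target.toList.length + 1) none).set target.toList.length (some []))) with hdpPrev
    have hinner : pvInnerB towels target dpPrev j = pvSolGo towels towels (target.toList.drop j) :=
      pvInnerB_eq towels target dpPrev j hjn hdp towels hne
    have hdropne : target.toList.drop j ≠ [] := by
      intro hh
      have := congrArg List.length hh
      simp only [List.length_drop, List.length_nil] at this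
      omega
    have hsolj : pvSol towels (target.toList.drop j) = pvSolGo towels towels (target.toList.drop j) := by
      rw [pvSol, if_neg hdropne]
    unfold pvStepB
    rw [hinner]
    cases hres : pvSolGo towels towels (target.toList.drop j) with
    | some v =>
      constructor
      · simp [hlen]
      · intro m
        by_cases hm : m = j
        · subst hm
          rw [List.getD, List.getElem?_set_self (by rw [hlen]; omega), if_pos (by omega), hsolj, hres]
          rfl
        · rw [List.getD, List.getElem?_set_ne (fun hh => hm hh.symm), ← List.getD]
          rw [hdp m]
          congr 1
          simp only [eq_iff_iff]
          omega
    | none =>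
      constructor
      · exact hlen
      · intro m
        by_cases hm : m = j
        · subst hm
          rw [hdp, if_neg (by omega), if_pos (by omega), hsolj, hres]
        · rw [hdp m]
          congr 1
          simp only [eq_iff_iff]
          omega

theorem pvAltEq (towels : List String) (target : String) (hne : ∀ t ∈ towels, t ≠ "") :
    find_towel_pattern_alt towels target = pvSol towels target.toList := by
  rw [pvAlt_def, List.range_eq_range']
  have := pvDpInv towels target hne (target.toList.length) 0 (by omega) (by omega)
  simp only [Nat.sub_zero] at this
  obtain ⟨_, hdp⟩ := this
  rw [hdp 0, if_pos (by omega), List.drop_zero]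

-- ===== VERDICT (by name: the statement is the Claim_ definition above) =====
theorem find_towel_pattern_spec : Claim_equal_find_towel_pattern := by
  intro towels target _ hpre
  unfold Spec_find_towel_pattern
  have hne : ∀ t ∈ towels, t ≠ "" := fun t ht h => hpre (h ▸ ht)
  rw [pvAltEq towels target hne]
  unfold find_towel_pattern
  rw [pvML towels target hne (pvFuelA towels target) [[]] (by simp) (by simp [pvJ])
    (by
      unfold pvCost pvFuelA
      simpa [pvJ] using pvCnt_le towels target.toList)]
  simp [pvFirst, pvJ]
  cases pvSol towels target.toList <;> simp
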